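-- pv_equiv track=rewrite | github.com/alessandrosebastianelli/alessandrosebastianelli.github.io | citation_generator/make_network_plot.py | normalize_author_name
-- ===== SOURCE A (Python) =====
-- def normalize_author_name(name):
--     """
--     Normalize author names to handle abbreviations and variations.
--     Returns (last_name, first_initial) tuple for matching.
--     """
--     # Remove extra whitespace
--     name = ' '.join(name.split())
--
--     # Remove periods and special characters
--     name = name.replace('.', '').replace('{', '').replace('}', '').replace('\\', '').replace('~', '')
--
--     # Handle special cases like "Del Rosso" or "Le Saux"
--     # These compound last names should be treated as a unit
--     name_lower = name.lower()
--
--     # Split by comma first (format: Last, First)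
--     if ',' in name:
--         parts = name.split(',')
--         last_name = parts[0].strip()
--         first_part = parts[1].strip() if len(parts) > 1 else ''
--     else:
--         # Split by space (format: First Last or F Last)
--         parts = name.split()
--         if len(parts) >= 2:
--             # Handle compound last names (del, de, le, van, von, di, etc.)
--             compound_prefixes = ['del', 'de', 'le', 'van', 'von', 'di', 'da', 'dos', 'las']
--
--             # Find where the last name starts
--             last_name_parts = []
--             first_name_parts = []
--             found_prefix = False
--
--             for i, part in enumerate(parts):
--                 if part.lower() in compound_prefixes or found_prefix:
--                     last_name_parts.append(part)
--                     found_prefix = True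
--                 elif i == len(parts) - 1:  # Last element is always part of last name
--                     last_name_parts.append(part)
--                 else:
--                     first_name_parts.append(part)
--
--             last_name = ' '.join(last_name_parts)
--             first_part = ' '.join(first_name_parts)
--         else:
--             last_name = name.strip()
--             first_part = ''
--
--     # Clean last name
--     last_name = last_name.strip().lower()
--
--     # Get first initial (can be multiple initials like "MP")
--     first_part = first_part.strip()
--     if first_part:
--         # Remove spaces between initials: "M P" -> "MP"
--         first_initials = ''.join([c for c in first_part if c.isalpha()])[:2].lower()
--     else:
--         first_initials = ''
--
--     return (last_name, first_initials)
-- ===== SOURCE B (Python) =====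
-- _PREFIXES = frozenset(('del', 'de', 'le', 'van', 'von', 'di', 'da', 'dos', 'las'))
-- _TBL = str.maketrans('', '', '.{}\\~')
--
--
-- def _split_words(words):
--     """Recursively peel leading first-name words off; the last name is the
--     suffix starting at the first compound prefix (or the final word)."""
--     head, *rest = words
--     if not rest or head.lower() in _PREFIXES:
--         return [], words
--     firsts, lasts = _split_words(rest)
--     return [head] + firsts, lasts
--
--
-- def normalize_author_name(name):
--     """
--     Normalize author names to handle abbreviations and variations.
--     Returns (last_name, first_initial) tuple for matching.
--     """
--     # Collapse whitespace and delete punctuation in one translation pass.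
--     clean = ' '.join(name.split()).translate(_TBL)
--
--     if ',' in clean:
--         pieces = clean.split(',')
--         last = pieces[0]
--         first = pieces[1] if len(pieces) > 1 else ''
--     else:
--         words = clean.split()
--         if len(words) >= 2:
--             firsts, lasts = _split_words(words)
--             first = ''.join(firsts)
--             last = ' '.join(lasts)
--         else:
--             last = clean
--             first = ''
--
--     initials = ''.join(c for c in first if c.isalpha())[:2].lower()
--     return (last.strip().lower(), initials)
-- ===== Notes on version B (the rewrite author's own statement) =====
-- stated objective: simpler
-- what changed: B does the punctuation removal in one translate/delete pass instead of five chained .replace passes, splits the word list with a small recursive function instead of A's stateful found_prefix accumulator loop with its i==len-1 special case, and builds the initials by filtering the concatenated first-name words directly, with no emptiness guard and no double stripping.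
import Mathlib
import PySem

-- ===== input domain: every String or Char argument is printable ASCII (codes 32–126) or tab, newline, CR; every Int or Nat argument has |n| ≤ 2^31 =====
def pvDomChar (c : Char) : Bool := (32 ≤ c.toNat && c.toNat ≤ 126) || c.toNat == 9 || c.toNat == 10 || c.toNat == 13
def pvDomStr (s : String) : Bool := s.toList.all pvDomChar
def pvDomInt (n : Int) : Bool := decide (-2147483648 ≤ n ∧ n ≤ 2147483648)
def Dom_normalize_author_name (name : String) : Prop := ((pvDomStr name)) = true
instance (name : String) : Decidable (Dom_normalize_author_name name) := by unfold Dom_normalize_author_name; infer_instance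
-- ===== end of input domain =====

-- B replaces A's five chained .replace passes by one translate (delete) pass, A's stateful
-- found_prefix accumulator loop by a recursive word splitter, and computes the initials by
-- filtering the concatenated first-name words with no emptiness guard; objective: simpler.

-- Shared constant: the compound-prefix list both Pythons carry.
def pvPrefixes : List (List Char) :=
  ["del".toList, "de".toList, "le".toList, "van".toList, "von".toList,
   "di".toList, "da".toList, "dos".toList, "las".toList]

-- ===== PORT A =====
-- name = ' '.join(name.split()); then the chained .replace removals of . { } \ ~
def pvClean (name : String) : List Char :=
  let n := PySem.Chars.join [' '] (PySem.Chars.split₀ name.toList)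
  PySem.Chars.replace (PySem.Chars.replace (PySem.Chars.replace
    (PySem.Chars.replace (PySem.Chars.replace n ['.'] []) ['{'] []) ['}'] []) ['\\'] []) ['~'] []

-- the comma branch: parts = name.split(','); last = parts[0].strip(); first = parts[1].strip() if len>1 else ''
def pvCommaBranch (n : List Char) : List Char × List Char :=
  let parts := (PySem.Chars.split? n [',']).getD []
  (PySem.Chars.strip (PySem.List.pyGetD parts 0 []),
   if parts.length > 1 then PySem.Chars.strip (PySem.List.pyGetD parts 1 []) else [])

-- A's loop body over enumerate(parts): state = (last_name_parts, first_name_parts, found_prefix)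
def pvLoopStep (n : Nat) (st : List (List Char) × List (List Char) × Bool)
    (ip : Int × List Char) : List (List Char) × List (List Char) × Bool :=
  if PySem.Chars.lower ip.2 ∈ pvPrefixes ∨ st.2.2 = true then (st.1 ++ [ip.2], st.2.1, true)
  else if ip.1 = (n : Int) - 1 then (st.1 ++ [ip.2], st.2.1, st.2.2)
  else (st.1, st.2.1 ++ [ip.2], st.2.2)

def pvBranchA (n : List Char) : List Char × List Char :=
  if PySem.Chars.isIn [','] n then pvCommaBranch n
  else
    let parts := PySem.Chars.split₀ n
    if parts.length ≥ 2 then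
      let r := (PySem.List.enumerate parts 0).foldl (pvLoopStep parts.length) ([], [], false)
      (PySem.Chars.join [' '] r.1, PySem.Chars.join [' '] r.2.1)
    else (PySem.Chars.strip n, ([] : List Char))

-- last_name.strip().lower(); first_part.strip(); if first_part: initials else ''
def pvFinish (last0 first0 : List Char) : String × String :=
  let last := PySem.Chars.lower (PySem.Chars.strip last0)
  let first := PySem.Chars.strip first0
  let fi := if first ≠ [] then PySem.Chars.lower ((first.filter PySem.Chars.isalpha).take 2) else []
  (String.ofList last, String.ofList fi)

def normalize_author_name (name : String) : String × String :=
  let lf := pvBranchA (pvClean name)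
  pvFinish lf.1 lf.2

-- ===== PORT B =====
-- the deletion table of str.translate: the characters removed
def pvDropChars : List Char := ['.', '{', '}', '\\', '~']

-- clean = ' '.join(name.split()).translate(_TBL): one pass deleting the listed characters
def pvCleanB (name : String) : List Char :=
  (PySem.Chars.join [' '] (PySem.Chars.split₀ name.toList)).filter (fun c => !pvDropChars.contains c)

-- _split_words: recursively peel leading first-name words; last name = suffix at first prefix / final word
def pvSplitWords : List (List Char) → List (List Char) × List (List Char)
  | [] => ([], [])          -- unreachable: only called on a non-empty word list
  | h :: rest =>
      if rest = [] ∨ PySem.Chars.lower h ∈ pvPrefixes then ([], h :: rest)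
      else
        let r := pvSplitWords rest
        (h :: r.1, r.2)

def normalize_author_name_alt (name : String) : String × String :=
  let clean := pvCleanB name
  let lf :=
    if PySem.Chars.isIn [','] clean then
      let pieces := (PySem.Chars.split? clean [',']).getD []
      (PySem.List.pyGetD pieces 0 [],
       if pieces.length > 1 then PySem.List.pyGetD pieces 1 [] else [])
    else
      let words := PySem.Chars.split₀ clean
      if words.length ≥ 2 then
        let fl := pvSplitWords words
        (PySem.Chars.join [' '] fl.2, PySem.Chars.join [] fl.1)
      else (clean, [])
  (String.ofList (PySem.Chars.lower (PySem.Chars.strip lf.1)),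
   String.ofList (PySem.Chars.lower ((lf.2.filter PySem.Chars.isalpha).take 2)))

-- ===== PRECONDITION & SPEC =====
def Spec_normalize_author_name (name : String) (out : String × String) : Prop := out = normalize_author_name_alt name
instance (name : String) (out : String × String) : Decidable (Spec_normalize_author_name name out) := by unfold Spec_normalize_author_name; infer_instance

-- ===== CLAIM (what is proved, stated in full; the proofs are below) =====
def Claim_equal_normalize_author_name : Prop := ∀ (name : String), Dom_normalize_author_name name → Spec_normalize_author_name name (normalize_author_name name)

-- ===== LEMMAS AND PROOFS =====

-- a whitespace character is never alphabetic (for the PySem classifiers)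
theorem pvIsspace_not_isalpha (c : Char) (h : PySem.Chars.isspace c = true) :
    PySem.Chars.isalpha c = false := by
  simp only [PySem.Chars.isspace, PySem.Chars.isalpha, PySem.Chars.isupper, PySem.Chars.islower,
    Char.le_def, UInt32.le_iff_toNat_le, Bool.or_eq_true, Bool.and_eq_true, decide_eq_true_eq,
    Bool.or_eq_false_iff, Bool.and_eq_false_iff, decide_eq_false_iff_not] at *
  simp only [Char.toNat, show 'A'.val.toNat = 65 from rfl, show 'Z'.val.toNat = 90 from rfl,
    show 'a'.val.toNat = 97 from rfl, show 'z'.val.toNat = 122 from rfl] at *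
  omega

-- deleting a single character with replace(s, c, '') is a filter
theorem pvReplaceGo_filter (c : Char) (l acc : List Char) (fuel : Nat) (hf : l.length ≤ fuel) :
    PySem.Chars.replace.go [c] [] fuel l acc = acc.reverse ++ l.filter (fun x => !(x == c)) := by
  induction l generalizing fuel acc with
  | nil => cases fuel <;> simp [PySem.Chars.replace.go]
  | cons a t ih =>
    cases fuel with
    | zero => simp at hf
    | succ fuel =>
      by_cases hac : c = a
      · subst hac
        simp only [PySem.Chars.replace.go, List.isPrefixOf, BEq.rfl, Bool.true_and,
          if_pos, List.length_cons, List.drop_succ_cons, List.length_nil,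
          List.reverse_nil, List.nil_append, List.drop_zero]
        rw [ih acc fuel (by simpa using hf)]
        simp
      · simp only [PySem.Chars.replace.go, List.isPrefixOf, Bool.and_true]
        rw [if_neg (by simp [beq_iff_eq]; exact hac)]
        rw [ih (a :: acc) fuel (by simpa using hf)]
        simp [Ne.symm hac]

theorem pvReplace_filter (s : List Char) (c : Char) :
    PySem.Chars.replace s [c] [] = s.filter (fun x => !(x == c)) := by
  simp only [PySem.Chars.replace, List.isEmpty_cons]
  simpa using pvReplaceGo_filter c s [] s.length le_rfl

-- the two cleanups agree: five replace passes = one deletion filter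
theorem pvCleanB_eq (name : String) : pvCleanB name = pvClean name := by
  unfold pvClean pvCleanB
  simp only [pvReplace_filter, List.filter_filter]
  apply List.filter_congr
  intro x _
  by_cases h1 : x = '.' <;> by_cases h2 : x = '{' <;> by_cases h3 : x = '}' <;>
    by_cases h4 : x = '\\' <;> by_cases h5 : x = '~' <;>
    simp [pvDropChars, h1, h2, h3, h4, h5]

-- filtering by a predicate that fails on whitespace ignores dropWhile isspace
theorem pvFilter_dropWhile (p : Char → Bool) (l : List Char)
    (hp : ∀ c, PySem.Chars.isspace c = true → p c = false) :
    (l.dropWhile PySem.Chars.isspace).filter p = l.filter p := by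
  induction l with
  | nil => rfl
  | cons a t ih =>
    by_cases h : PySem.Chars.isspace a = true
    · simp [h, ih, hp a h]
    · have h' : PySem.Chars.isspace a = false := by simpa using h
      simp [h']

-- filtering by such a predicate ignores strip entirely
theorem pvFilter_strip (p : Char → Bool) (l : List Char)
    (hp : ∀ c, PySem.Chars.isspace c = true → p c = false) :
    (PySem.Chars.strip l).filter p = l.filter p := by
  unfold PySem.Chars.strip PySem.Chars.rstrip PySem.Chars.lstrip
  rw [List.filter_reverse, pvFilter_dropWhile p _ hp, List.filter_reverse, List.reverse_reverse,
    pvFilter_dropWhile p l hp]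

-- dropWhile leaves a list alone once it has been dropWhile'd, even after trimming its tail
theorem pvDropWhile_rstrip (q : Char → Bool) (m : List Char) (hm : m.dropWhile q = m) :
    ((m.reverse.dropWhile q).reverse).dropWhile q = (m.reverse.dropWhile q).reverse := by
  rcases h : (m.reverse.dropWhile q).reverse with _ | ⟨a, t⟩
  · rfl
  · have hpre : (m.reverse.dropWhile q).reverse <+: m := by
      have := List.dropWhile_suffix (l := m.reverse) (p := q)
      have : (m.reverse.dropWhile q).reverse <+: m.reverse.reverse := List.reverse_prefix.mpr this
      simpa using this
    rw [h] at hpre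
    obtain ⟨s, hs⟩ := hpre
    have hqa : q a = false := by
      rcases hq : q a with _ | _
      · rfl
      · exfalso
        have : m.dropWhile q = m := hm
        rw [← hs] at this
        rw [List.cons_append, List.dropWhile_cons, hq] at this
        have this2 : List.dropWhile q (t ++ s) = a :: (t ++ s) := by simpa using this
        have hlen : ((t ++ s).dropWhile q).length = t.length + s.length + 1 := by
          rw [this2]; simp
        have hle : ((t ++ s).dropWhile q).length ≤ (t ++ s).length :=
          List.Sublist.length_le (List.dropWhile_sublist _)
        simp only [List.length_append] at hle
        omega
    rw [List.dropWhile_cons, hqa]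
    simp

-- strip is idempotent
theorem pvStrip_idem (l : List Char) : PySem.Chars.strip (PySem.Chars.strip l) = PySem.Chars.strip l := by
  unfold PySem.Chars.strip PySem.Chars.rstrip PySem.Chars.lstrip
  rw [pvDropWhile_rstrip PySem.Chars.isspace (l.dropWhile PySem.Chars.isspace)
    (List.dropWhile_idempotent _ _)]
  rw [List.reverse_reverse, List.dropWhile_idempotent]

-- joining with ' ' or with '' makes no difference under the alphabetic filter
theorem pvFilter_join_space (L : List (List Char)) :
    (PySem.Chars.join [' '] L).filter PySem.Chars.isalpha
      = (PySem.Chars.join [] L).filter PySem.Chars.isalpha := by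
  induction L with
  | nil => rfl
  | cons x t ih =>
    cases t with
    | nil => simp [PySem.Chars.join_singleton]
    | cons y t' =>
      rw [PySem.Chars.join_cons_cons, PySem.Chars.join_cons_cons]
      simp only [List.filter_append, ih]
      simp [show PySem.Chars.isalpha ' ' = false from rfl]

-- A's guarded initials computation equals B's unguarded one
theorem pvFinish_initials (x : List Char) :
    (if PySem.Chars.strip x ≠ [] then
        PySem.Chars.lower (((PySem.Chars.strip x).filter PySem.Chars.isalpha).take 2) else [])
      = PySem.Chars.lower ((x.filter PySem.Chars.isalpha).take 2) := by
  rw [pvFilter_strip PySem.Chars.isalpha x pvIsspace_not_isalpha]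
  by_cases h : PySem.Chars.strip x = []
  · rw [if_neg (by simpa using h)]
    have : x.filter PySem.Chars.isalpha = [] := by
      rw [← pvFilter_strip PySem.Chars.isalpha x pvIsspace_not_isalpha, h]; rfl
    rw [this]; rfl
  · rw [if_pos h]

-- Once found_prefix is true, A's loop appends every remaining token to last_name_parts.
theorem pvLoop_absorb (n : Nat) (ps : List (List Char)) :
    ∀ (s : Int) (l f : List (List Char)),
    (PySem.List.enumerate ps s).foldl (pvLoopStep n) (l, f, true) = (l ++ ps, f, true) := by
  induction ps with
  | nil => intro s l f; simp [PySem.List.enumerate]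
  | cons p rest ih =>
    intro s l f
    rw [PySem.List.enumerate_cons]
    simp only [List.foldl_cons, pvLoopStep, or_true, if_pos]
    rw [ih (s + 1) (l ++ [p]) f]
    simp

-- A's flag loop computes the first-prefix-index slice decomposition.
theorem pvLoop_eq_slice (n : Nat) (ps : List (List Char)) :
    ∀ (s : Int) (l f : List (List Char)), ps ≠ [] → s + ps.length = n →
    (PySem.List.enumerate ps s).foldl (pvLoopStep n) (l, f, false) =
      (let k := (ps.findIdx? (fun p => decide (PySem.Chars.lower p ∈ pvPrefixes))).getD (ps.length - 1)
       (l ++ ps.drop k, f ++ ps.take k,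
        (ps.findIdx? (fun p => decide (PySem.Chars.lower p ∈ pvPrefixes))).isSome)) := by
  induction ps with
  | nil => intro s l f h; exact absurd rfl h
  | cons p rest ih =>
    intro s l f _ hlen
    rw [PySem.List.enumerate_cons]
    by_cases hp : PySem.Chars.lower p ∈ pvPrefixes
    · simp only [List.foldl_cons, pvLoopStep, hp, true_or, if_pos]
      rw [pvLoop_absorb]
      simp [List.findIdx?_cons, hp]
    · rcases rest with _ | ⟨q, rest'⟩
      · have hs : s = (n : Int) - 1 := by simp at hlen; omega
        simp [pvLoopStep, hp, hs, PySem.List.enumerate, List.findIdx?_cons]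
      · have hs : ¬ (s = (n : Int) - 1) := by
          simp only [List.length_cons] at hlen; push_cast at hlen; omega
        simp only [List.foldl_cons, pvLoopStep, hp, false_or, hs, if_false,
          Bool.false_eq_true]
        rw [ih (s + 1) l (f ++ [p]) (by simp) (by simp only [List.length_cons] at hlen ⊢; push_cast at hlen ⊢; omega)]
        rcases hfi : (q :: rest').findIdx? (fun p => decide (PySem.Chars.lower p ∈ pvPrefixes)) with _ | k
        · simp [List.findIdx?_cons, hp, hfi, List.length_cons,
            List.drop_succ_cons, List.take_succ_cons]
        · simp [List.findIdx?_cons, hp, hfi, List.drop_succ_cons, List.take_succ_cons]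

-- B's recursive splitter is the same take/drop at the first prefix index (default: last word)
theorem pvSplitWords_eq (ps : List (List Char)) (hne : ps ≠ []) :
    pvSplitWords ps =
      (ps.take ((ps.findIdx? (fun p => decide (PySem.Chars.lower p ∈ pvPrefixes))).getD (ps.length - 1)),
       ps.drop ((ps.findIdx? (fun p => decide (PySem.Chars.lower p ∈ pvPrefixes))).getD (ps.length - 1))) := by
  induction ps with
  | nil => exact absurd rfl hne
  | cons p rest ih =>
    by_cases hp : PySem.Chars.lower p ∈ pvPrefixes
    · simp [pvSplitWords, hp, List.findIdx?_cons]
    · rcases rest with _ | ⟨q, rest'⟩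
      · simp [pvSplitWords, List.findIdx?_cons, hp]
      · rw [show pvSplitWords (p :: q :: rest')
            = (p :: (pvSplitWords (q :: rest')).1, (pvSplitWords (q :: rest')).2) by
          simp [pvSplitWords, hp]]
        rw [ih (by simp)]
        rcases hfi : (q :: rest').findIdx? (fun p => decide (PySem.Chars.lower p ∈ pvPrefixes)) with _ | k
        · simp [List.findIdx?_cons, hp, hfi, List.length_cons,
            List.drop_succ_cons, List.take_succ_cons]
        · simp [List.findIdx?_cons, hp, hfi, List.drop_succ_cons, List.take_succ_cons]

-- ===== VERDICT (by name: the statement is the Claim_ definition above) =====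
theorem normalize_author_name_spec : Claim_equal_normalize_author_name := by
  intro name _
  unfold Spec_normalize_author_name normalize_author_name normalize_author_name_alt
  rw [pvCleanB_eq]
  generalize pvClean name = n
  unfold pvBranchA pvFinish
  simp only []
  by_cases hc : PySem.Chars.isIn [','] n = true
  · rw [if_pos hc, if_pos hc]
    unfold pvCommaBranch
    simp only []
    rw [Prod.mk.injEq]
    constructor
    · rw [pvStrip_idem]
    · by_cases hl : ((PySem.Chars.split? n [',']).getD []).length > 1
      · rw [if_pos hl, if_pos hl,
          pvFinish_initials (PySem.Chars.strip (PySem.List.pyGetD ((PySem.Chars.split? n [',']).getD []) 1 [])),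
          pvFilter_strip PySem.Chars.isalpha _ pvIsspace_not_isalpha]
      · rw [if_neg hl, if_neg hl]
        rfl
  · rw [if_neg hc, if_neg hc]
    by_cases hl : (PySem.Chars.split₀ n).length ≥ 2
    · rw [if_pos hl, if_pos hl]
      have hne : PySem.Chars.split₀ n ≠ [] := by
        intro h; rw [h] at hl; simp at hl
      rw [pvLoop_eq_slice (PySem.Chars.split₀ n).length (PySem.Chars.split₀ n) 0 [] [] hne (by simp)]
      rw [pvSplitWords_eq (PySem.Chars.split₀ n) hne]
      simp only []
      simp only [List.nil_append]
      rw [Prod.mk.injEq]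
      constructor
      · rfl
      · rw [pvFinish_initials, pvFilter_join_space]
    · rw [if_neg hl, if_neg hl]
      rw [Prod.mk.injEq]
      constructor
      · rw [pvStrip_idem]
      · rfl
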